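-- pv_equiv track=rewrite | github.com/osoleve/hermitclaw | myxo/brain.py | _parse_rlm_result
-- ===== SOURCE A (Python) =====
-- def _parse_rlm_result(result: str) -> tuple[str, str]:
--     """Parse an RLM S-expression result into (status, output_text)."""
--     if result.startswith("Error:"):
--         return "error", result
--
--     prefix = "(rlm2-run-result "
--     idx = result.find(prefix)
--     if idx < 0:
--         return "unknown", result[:300]
--
--     rest = result[idx + len(prefix):]
--     # Extract status word (completed, exhausted, etc.)
--     space_idx = rest.find(" ")
--     if space_idx < 0:
--         return "unknown", result[:300]
--     status = rest[:space_idx]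
--     rest = rest[space_idx + 1:]
--
--     # Extract the quoted output string (handles escaped quotes)
--     if not rest.startswith('"'):
--         return status, rest[:300]
--
--     chars = []
--     i = 1
--     while i < len(rest):
--         if rest[i] == '\\' and i + 1 < len(rest):
--             chars.append(rest[i + 1])
--             i += 2
--         elif rest[i] == '"':
--             break
--         else:
--             chars.append(rest[i])
--             i += 1
--     return status, ''.join(chars)
-- ===== SOURCE B (Python) =====
-- def _parse_rlm_result(result: str) -> tuple[str, str]:
--     """Parse an RLM S-expression result into (status, output_text)."""
--     if result.startswith("Error:"):
--         return "error", result
--     parsed = _parse_body(result)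
--     if parsed is None:
--         return "unknown", result[:300]
--     return parsed
--
--
-- def _parse_body(result):
--     """Return (status, output) if the S-expression shape is present, else None."""
--     _, sep, rest = result.partition("(rlm2-run-result ")
--     if not sep:
--         return None
--     status, sp, rest2 = rest.partition(" ")
--     if not sp:
--         return None
--     if not rest2.startswith('"'):
--         return status, rest2[:300]
--     return status, _decode(rest2[1:])
--
--
-- def _decode(tail):
--     """Two staged passes: find the boundary of the quoted content, then unescape the slice."""
--     end, i = len(tail), 0
--     while i < len(tail):
--         if tail[i] == '\\' and i + 1 < len(tail):
--             i += 2
--         elif tail[i] == '"':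
--             end = i
--             break
--         else:
--             i += 1
--     content = tail[:end]
--     out = []
--     j = 0
--     while j < len(content):
--         if content[j] == '\\' and j + 1 < len(content):
--             out.append(content[j + 1])
--             j += 2
--         else:
--             out.append(content[j])
--             j += 1
--     return ''.join(out)
-- ===== Notes on version B (the rewrite author's own statement) =====
-- stated objective: alternative
-- what changed: A's flat early-return cascade with an inline quote-finding/unescaping while-loop is re-decomposed into helpers: a partition-based _parse_body returning None on shape failure (one unknown-path at the top level), and a _decode that finds the boundary of the quoted content in one pass and unescapes the slice in a separate pass.
import Mathlib
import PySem

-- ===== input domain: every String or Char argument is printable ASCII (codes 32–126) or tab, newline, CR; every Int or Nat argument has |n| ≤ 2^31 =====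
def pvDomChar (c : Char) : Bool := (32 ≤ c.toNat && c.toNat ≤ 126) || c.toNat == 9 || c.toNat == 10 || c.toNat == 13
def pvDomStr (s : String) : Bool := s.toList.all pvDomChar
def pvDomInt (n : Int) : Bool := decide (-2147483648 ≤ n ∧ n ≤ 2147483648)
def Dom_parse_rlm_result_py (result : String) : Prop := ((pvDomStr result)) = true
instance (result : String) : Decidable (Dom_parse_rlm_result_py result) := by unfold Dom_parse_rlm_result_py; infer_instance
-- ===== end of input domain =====

-- B re-decomposes A: a partition-based Option-returning body parser plus a two-pass decode
-- (boundary scan, then unescape of the slice) replace A's flat cascade with its inline loop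
-- (alternative decomposition, same O(n) cost).

-- ===== PORT A =====
-- A's while loop over rest from index 1: build chars, handling '\c' pairs, stop at '"'
def pvLoopA : List Char → List Char
  | [] => []
  | '\\' :: c :: t => c :: pvLoopA t
  | '"' :: _ => []
  | c :: t => c :: pvLoopA t

def parse_rlm_result_py (result : String) : String × String :=
  if PySem.Str.startswith result "Error:" then ("error", result)
  else
    let pfx := "(rlm2-run-result "
    let idx := PySem.Str.find result pfx
    if idx < 0 then ("unknown", PySem.Str.slice result none (some 300))
    else
      let rest := PySem.Str.slice result (some (idx + PySem.Str.len pfx)) none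
      let spaceIdx := PySem.Str.find rest " "
      if spaceIdx < 0 then ("unknown", PySem.Str.slice result none (some 300))
      else
        let status := PySem.Str.slice rest none (some spaceIdx)
        let rest2 := PySem.Str.slice rest (some (spaceIdx + 1)) none
        if !(PySem.Str.startswith rest2 "\"") then (status, PySem.Str.slice rest2 none (some 300))
        else (status, String.ofList (pvLoopA (rest2.toList.drop 1)))

-- ===== PORT B =====
-- Source B's str.partition(sep): (before, sep, after), or (s, "", "") when sep is absent
def pvPartition (s sep : String) : String × String × String :=
  let i := PySem.Str.find s sep
  if i < 0 then (s, "", "")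
  else (PySem.Str.slice s none (some i), sep, PySem.Str.slice s (some (i + PySem.Str.len sep)) none)

-- first pass of _decode: length of the content before the first unescaped quote
def pvScanEnd : List Char → Nat
  | [] => 0
  | '\\' :: _ :: t => 2 + pvScanEnd t
  | '"' :: _ => 0
  | _ :: t => 1 + pvScanEnd t

-- second pass of _decode: unescape the sliced content
def pvUnesc : List Char → List Char
  | [] => []
  | '\\' :: c :: t => c :: pvUnesc t
  | '\\' :: [] => ['\\']
  | c :: t => c :: pvUnesc t

def pvDecode (tail : List Char) : String :=
  String.ofList (pvUnesc (tail.take (pvScanEnd tail)))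

-- Source B's _parse_body: none when the S-expression shape is missing
def pvParseBody (result : String) : Option (String × String) :=
  let p := pvPartition result "(rlm2-run-result "
  if p.2.1 = "" then none
  else
    let q := pvPartition p.2.2 " "
    if q.2.1 = "" then none
    else if PySem.Str.startswith q.2.2 "\"" then some (q.1, pvDecode (q.2.2.toList.drop 1))
    else some (q.1, PySem.Str.slice q.2.2 none (some 300))

def parse_rlm_result_py_alt (result : String) : String × String :=
  if PySem.Str.startswith result "Error:" then ("error", result)
  else
    match pvParseBody result with
    | none => ("unknown", PySem.Str.slice result none (some 300))
    | some p => p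

-- ===== PRECONDITION & SPEC =====
def Spec_parse_rlm_result_py (result : String) (out : String × String) : Prop := out = parse_rlm_result_py_alt result
instance (result : String) (out : String × String) : Decidable (Spec_parse_rlm_result_py result out) := by unfold Spec_parse_rlm_result_py; infer_instance

-- ===== CLAIM (what is proved, stated in full; the proofs are below) =====
def Claim_equal_parse_rlm_result_py : Prop := ∀ (result : String), Dom_parse_rlm_result_py result → Spec_parse_rlm_result_py result (parse_rlm_result_py result)

-- ===== LEMMAS AND PROOFS =====
lemma pvLoopA_eq_unesc_scan : ∀ l : List Char, pvLoopA l = pvUnesc (l.take (pvScanEnd l)) := by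
  intro l
  fun_induction pvLoopA l with
  | case1 => simp [pvScanEnd, pvUnesc]
  | case2 c t ih =>
      rw [pvScanEnd, show 2 + pvScanEnd t = (pvScanEnd t + 1) + 1 from by omega,
        List.take_succ_cons, List.take_succ_cons, pvUnesc, ih]
  | case3 t => simp [pvScanEnd, pvUnesc]
  | case4 c t h1 h2 ih =>
      rcases eq_or_ne c '\\' with rfl | hc
      · have ht : t = [] := by
          cases t with
          | nil => rfl
          | cons a b => exact absurd rfl (fun h => h1 a b rfl h)
        subst ht; simp [pvScanEnd, pvUnesc, pvLoopA]
      · have hq : c ≠ '"' := fun h => h2 h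
        have hs : pvScanEnd (c :: t) = pvScanEnd t + 1 := by
          rw [pvScanEnd.eq_def]; split <;> simp_all <;> omega
        have hu : pvUnesc (c :: List.take (pvScanEnd t) t) = c :: pvUnesc (List.take (pvScanEnd t) t) := by
          rw [pvUnesc.eq_def]; split; all_goals simp_all
        rw [hs, List.take_succ_cons, hu, ih]

-- ===== VERDICT (by name: the statement is the Claim_ definition above) =====
theorem parse_rlm_result_py_spec : Claim_equal_parse_rlm_result_py := by
  intro result _
  unfold Spec_parse_rlm_result_py parse_rlm_result_py parse_rlm_result_py_alt pvParseBody pvPartition pvDecode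
  by_cases hE : PySem.Str.startswith result "Error:" = true <;>
    simp only [hE, if_true, if_false, Bool.false_eq_true]
  by_cases h1 : PySem.Str.find result "(rlm2-run-result " < 0 <;>
    simp only [h1, if_true, if_false, String.reduceEq]
  set rest := PySem.Str.slice result (some (PySem.Str.find result "(rlm2-run-result " + PySem.Str.len "(rlm2-run-result ")) none with hrest
  by_cases h2 : PySem.Str.find rest " " < 0 <;>
    simp only [h2, if_true, if_false, String.reduceEq]
  by_cases h3 : PySem.Str.startswith (PySem.Str.slice rest (some (PySem.Str.find rest " " + PySem.Str.len " ")) none) "\"" = true <;>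
    simp only [show PySem.Str.len " " = 1 from rfl] at h3 ⊢ <;>
    simp only [h3, Bool.not_true, Bool.not_false, Bool.false_eq_true, if_true, if_false,
      pvLoopA_eq_unesc_scan]
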